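-- pv_equiv track=rewrite | github.com/ojs201/Algorithm-Study_23-2 | DaeunHong/4th week assignment/기능개발.py | solution
-- ===== SOURCE A (Python) =====
-- def solution(progresses, speeds):
--     day = []
--     for i in range(len(progresses)):
--         temp = progresses[i]
--         dayCnt = 0
--         while temp < 100:
--             temp += speeds[i]
--             dayCnt += 1
--         day.append(dayCnt)
--     answer = []
--
--     first = day[0]
--     count = 1
--     for i in range(1, len(day)):
--         if first >= day[i]:
--             count += 1
--         else:
--             answer.append(count)
--             first = day[i]
--             count = 1
--     answer.append(count)
--     return answer
-- ===== SOURCE B (Python) =====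
-- def solution(progresses, speeds):
--     # days needed per feature via ceiling division instead of a per-day loop
--     days = [0 if p >= 100 else -((p - 100) // speeds[i]) for i, p in enumerate(progresses)]
--     answer = []
--     start = 0
--     for i in range(1, len(days) + 1):
--         if i == len(days) or days[i] > days[start]:
--             answer.append(i - start)
--             start = i
--     return answer
-- ===== Notes on version B (the rewrite author's own statement) =====
-- stated objective: faster
-- what changed: B computes each feature's remaining days with a single ceiling division instead of A's per-day while loop, and groups releases with a boundary two-pointer scan instead of A's running (first, count) accumulator; intended as asymptotically faster (O(n) vs O(n*maxDays)) - measured: A timed out at n=16 where B returned, so no clean ratio could be read.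
import Mathlib
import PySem

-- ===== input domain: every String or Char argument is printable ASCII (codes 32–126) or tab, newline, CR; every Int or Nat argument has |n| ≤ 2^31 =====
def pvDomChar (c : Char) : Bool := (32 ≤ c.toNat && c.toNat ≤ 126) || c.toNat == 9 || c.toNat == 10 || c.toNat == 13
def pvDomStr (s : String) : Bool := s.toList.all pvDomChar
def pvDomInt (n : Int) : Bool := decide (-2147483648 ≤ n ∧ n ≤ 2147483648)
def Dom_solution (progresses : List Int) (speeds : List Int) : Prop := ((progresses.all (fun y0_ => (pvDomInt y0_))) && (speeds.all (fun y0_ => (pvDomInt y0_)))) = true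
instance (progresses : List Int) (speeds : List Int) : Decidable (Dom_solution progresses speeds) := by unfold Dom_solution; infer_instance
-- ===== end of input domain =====

-- B replaces A's per-day while loop by a ceiling division and A's running group counter by a
-- boundary two-pointer scan; equivalence proved on Pre_solution.

-- ===== PORT A =====
-- the 'while temp < 100: temp += speeds[i]' loop; when the speed is ≤ 0 and temp < 100 the
-- Python loop diverges (such inputs are excluded by Pre_solution), the port returns 0 there to stay total
def dayCountA (temp s dayCnt : Int) : Int :=
  if _h : temp < 100 then
    if _hs : 0 < s then dayCountA (temp + s) s (dayCnt + 1) else dayCnt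
  else dayCnt
termination_by (100 - temp).toNat
decreasing_by omega

def solution (progresses : List Int) (speeds : List Int) : List Int :=
  let day := (PySem.List.pyRange 0 (progresses.length : Int) 1).foldl
    (fun acc i =>
      acc ++ [dayCountA (PySem.List.pyGetD progresses i 0) (PySem.List.pyGetD speeds i 0) 0]) []
  let st := (PySem.List.pyRange 1 (day.length : Int) 1).foldl
    (fun (st : List Int × Int × Int) i =>
      if st.2.1 ≥ PySem.List.pyGetD day i 0 then (st.1, st.2.1, st.2.2 + 1)
      else (st.1 ++ [st.2.2], PySem.List.pyGetD day i 0, 1))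
    ([], PySem.List.pyGetD day 0 0, 1)
  st.1 ++ [st.2.2]

-- ===== PORT B =====
def dayNeededB (p s : Int) : Int :=
  if p ≥ 100 then 0 else -(PySem.Int.floordiv (p - 100) s)

def solution_alt (progresses : List Int) (speeds : List Int) : List Int :=
  let days := (PySem.List.enumerate progresses 0).map
    (fun pr => dayNeededB pr.2 (PySem.List.pyGetD speeds pr.1 0))
  let st := (PySem.List.pyRange 1 ((days.length : Int) + 1) 1).foldl
    (fun (st : List Int × Int) i =>
      if i = (days.length : Int) ∨ PySem.List.pyGetD days st.2 0 < PySem.List.pyGetD days i 0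
      then (st.1 ++ [i - st.2], i) else st)
    ([], 0)
  st.1

-- ===== PRECONDITION & SPEC =====
-- Pre_ excludes the empty progresses list (A raises IndexError on day[0]) and any index whose
-- feature is unfinished (< 100) while its speed entry is missing (IndexError) or ≤ 0 (A loops forever).
def Pre_solution (progresses : List Int) (speeds : List Int) : Prop :=
  progresses ≠ [] ∧ ∀ i : Nat, i < progresses.length → progresses.getD i 0 < 100 →
    i < speeds.length ∧ 0 < speeds.getD i 0
instance (progresses : List Int) (speeds : List Int) : Decidable (Pre_solution progresses speeds) := by
  unfold Pre_solution; infer_instance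

def pvWitness_solution : List Int × List Int := ([93, 30, 55], [1, 30, 5])

def Spec_solution (progresses : List Int) (speeds : List Int) (out : List Int) : Prop := out = solution_alt progresses speeds
instance (progresses : List Int) (speeds : List Int) (out : List Int) : Decidable (Spec_solution progresses speeds out) := by unfold Spec_solution; infer_instance

-- ===== CLAIM (what is proved, stated in full; the proofs are below) =====
def Claim_equal_solution : Prop := ∀ (progresses : List Int) (speeds : List Int), Dom_solution progresses speeds → Pre_solution progresses speeds → Spec_solution progresses speeds (solution progresses speeds)

-- ===== LEMMAS AND PROOFS =====

-- A's while loop computes B's ceiling division when the speed is positive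
lemma dayCountA_eq (temp s c : Int) (hs : 0 < s) :
    dayCountA temp s c = c + (if temp ≥ 100 then 0 else -(PySem.Int.floordiv (temp - 100) s)) := by
  induction hn : (100 - temp).toNat using Nat.strong_induction_on generalizing temp c with
  | _ n ih =>
  rw [dayCountA]
  by_cases h : temp < 100
  · simp only [dif_pos h, dif_pos hs, if_neg (by omega : ¬ temp ≥ 100)]
    rw [ih (100 - (temp + s)).toNat (by omega) (temp + s) (c + 1) rfl]
    have hrw : temp - 100 = -(100 - temp) := by ring
    rw [hrw]
    by_cases hc : temp + s ≥ 100
    · simp only [if_pos hc]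
      have h1 : -(PySem.Int.floordiv (-(100 - temp)) s) = 1 := by
        rw [PySem.Int.neg_floordiv_neg_eq_iff_of_pos hs]
        constructor
        · nlinarith
        · nlinarith
      omega
    · simp only [if_neg hc]
      have hrw2 : temp + s - 100 = -(100 - (temp + s)) := by ring
      rw [hrw2]
      set q := -(PySem.Int.floordiv (-(100 - (temp + s))) s) with hq
      have hb : (q - 1) * s < 100 - (temp + s) ∧ 100 - (temp + s) ≤ q * s := by
        rw [← PySem.Int.neg_floordiv_neg_eq_iff_of_pos hs]
      have : -(PySem.Int.floordiv (-(100 - temp)) s) = q + 1 := by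
        rw [PySem.Int.neg_floordiv_neg_eq_iff_of_pos hs]
        constructor
        · nlinarith [hb.1]
        · nlinarith [hb.2]
      omega
  · simp only [dif_neg h, if_pos (by omega : temp ≥ 100)]
    omega

-- A's running (first, count) grouping fold equals B's boundary two-pointer fold, generalized
-- over the suffix of indices still to process
lemma group_eq (day : List Int) :
    ∀ (k : Nat) (j start : Int) (ans : List Int), 0 ≤ start → start < j → j ≤ (day.length : Int) →
    ((day.length : Int) - j).toNat = k →
    (((PySem.List.pyRange j (day.length : Int) 1).foldl
      (fun (st : List Int × Int × Int) i =>
        if st.2.1 ≥ PySem.List.pyGetD day i 0 then (st.1, st.2.1, st.2.2 + 1)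
        else (st.1 ++ [st.2.2], PySem.List.pyGetD day i 0, 1))
      (ans, PySem.List.pyGetD day start 0, j - start)).1)
    ++ [((PySem.List.pyRange j (day.length : Int) 1).foldl
      (fun (st : List Int × Int × Int) i =>
        if st.2.1 ≥ PySem.List.pyGetD day i 0 then (st.1, st.2.1, st.2.2 + 1)
        else (st.1 ++ [st.2.2], PySem.List.pyGetD day i 0, 1))
      (ans, PySem.List.pyGetD day start 0, j - start)).2.2]
    = ((PySem.List.pyRange j ((day.length : Int) + 1) 1).foldl
        (fun (st : List Int × Int) i =>
          if i = (day.length : Int) ∨ PySem.List.pyGetD day st.2 0 < PySem.List.pyGetD day i 0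
          then (st.1 ++ [i - st.2], i) else st)
        (ans, start)).1 := by
  intro k
  induction k with
  | zero =>
    intro j start ans h0 h1 h2 hk
    have hj : j = (day.length : Int) := by omega
    subst hj
    rw [PySem.List.pyRange_one_eq_nil (le_refl _), PySem.List.pyRange_one_singleton]
    simp
  | succ k ih =>
    intro j start ans h0 h1 h2 hk
    have hlt : j < (day.length : Int) := by omega
    rw [PySem.List.pyRange_one_cons hlt, PySem.List.pyRange_one_cons (by omega : j < (day.length : Int) + 1)]
    simp only [List.foldl_cons]
    by_cases hc : PySem.List.pyGetD day start 0 ≥ PySem.List.pyGetD day j 0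
    · rw [if_pos hc, if_neg (by push Not; constructor <;> omega)]
      have := ih (j + 1) start ans h0 (by omega) (by omega) (by omega)
      rw [show j - start + 1 = j + 1 - start by ring] at *
      exact this
    · rw [if_neg hc, if_pos (by right; omega)]
      have := ih (j + 1) j (ans ++ [j - start]) (by omega) (by omega) (by omega) (by omega)
      rw [show j + 1 - j = (1 : Int) by ring] at this
      exact this

-- under Pre_, A's per-index day list equals B's ceiling-division day list
lemma day_lists_eq (progresses speeds : List Int)
    (hidx : ∀ i : Nat, i < progresses.length → progresses.getD i 0 < 100 →
      i < speeds.length ∧ 0 < speeds.getD i 0) :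
    (PySem.List.pyRange 0 (progresses.length : Int) 1).foldl
      (fun acc i =>
        acc ++ [dayCountA (PySem.List.pyGetD progresses i 0) (PySem.List.pyGetD speeds i 0) 0]) []
    = (PySem.List.enumerate progresses 0).map
        (fun pr => dayNeededB pr.2 (PySem.List.pyGetD speeds pr.1 0)) := by
  rw [PySem.List.foldl_append_singleton_eq_map]
  rw [PySem.List.enumerate_eq_map_pyRange progresses 0, List.map_map]
  simp only [List.nil_append]
  apply List.map_congr_left
  intro i hi
  rw [PySem.List.mem_pyRange_one] at hi
  have hlen : i.toNat < progresses.length := by omega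
  have hpg : PySem.List.pyGetD progresses i 0 = progresses.getD i.toNat 0 := by
    rw [PySem.List.pyGetD_eq_getElem _ _ hi.1 (by exact_mod_cast hi.2), List.getD_eq_getElem _ _ hlen]
  simp only [Function.comp]
  by_cases hp : progresses.getD i.toNat 0 < 100
  · obtain ⟨hsl, hspos⟩ := hidx i.toNat hlen hp
    have hsg : PySem.List.pyGetD speeds i 0 = speeds.getD i.toNat 0 := by
      rw [PySem.List.pyGetD_eq_getElem _ _ hi.1 (by omega), List.getD_eq_getElem _ _ hsl]
    rw [hpg, hsg, dayCountA_eq _ _ _ hspos, dayNeededB]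
    ring
  · rw [hpg, dayCountA, dayNeededB]
    simp only [dif_neg (by omega : ¬ progresses.getD i.toNat 0 < 100),
      if_pos (by omega : progresses.getD i.toNat 0 ≥ 100)]

-- ===== VERDICT (by name: the statement is the Claim_ definition above) =====
theorem solution_spec : Claim_equal_solution := by
  intro progresses speeds _ hpre
  obtain ⟨hne, hidx⟩ := hpre
  unfold Spec_solution
  simp only [solution, solution_alt]
  rw [day_lists_eq progresses speeds hidx]
  set days := (PySem.List.enumerate progresses 0).map
    (fun pr => dayNeededB pr.2 (PySem.List.pyGetD speeds pr.1 0)) with hdays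
  have hlen : days.length = progresses.length := by
    rw [hdays, List.length_map, PySem.List.length_enumerate]
  have hpos : 1 ≤ (days.length : Int) := by
    have : progresses.length ≠ 0 := fun h => hne (List.eq_nil_of_length_eq_zero h)
    omega
  have := group_eq days ((days.length : Int) - 1).toNat 1 0 []
    (le_refl 0) (by omega) hpos rfl
  rw [show (1 : Int) - 0 = 1 by ring] at this
  exact this
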